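-- pv_equiv track=rewrite | github.com/MaximeMoutet13/Stage_2020 | tbs/chordal/chordal_cover_graph.py | get_first_non_empty_lines
-- ===== SOURCE A (Python) =====
-- def get_first_non_empty_lines(matrix, empty):
--     first_non_empty_line = []
--     for column in range(len(matrix[0])):
--         not_empty_line = -1
--         for line in range(len(matrix)):
--             if matrix[line][column] != empty:
--                 not_empty_line = line
--                 break
--         first_non_empty_line.append(not_empty_line)
--     return first_non_empty_line
-- ===== SOURCE B (Python) =====
-- def get_first_non_empty_lines(matrix, empty):
--     ncols = len(matrix[0])
--     result = [-1] * ncols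
--     remaining = ncols
--     for row_idx, row in enumerate(matrix):
--         if remaining == 0:
--             break
--         for col in range(ncols):
--             if result[col] == -1 and row[col] != empty:
--                 result[col] = row_idx
--                 remaining -= 1
--     return result
-- ===== Notes on version B (the rewrite author's own statement) =====
-- stated objective: alternative
-- what changed: B walks the matrix row-major once, maintaining the list of still-unresolved columns and a remaining counter with an early break once every column is resolved, instead of A's independent top-down scan per column.
import Mathlib
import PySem

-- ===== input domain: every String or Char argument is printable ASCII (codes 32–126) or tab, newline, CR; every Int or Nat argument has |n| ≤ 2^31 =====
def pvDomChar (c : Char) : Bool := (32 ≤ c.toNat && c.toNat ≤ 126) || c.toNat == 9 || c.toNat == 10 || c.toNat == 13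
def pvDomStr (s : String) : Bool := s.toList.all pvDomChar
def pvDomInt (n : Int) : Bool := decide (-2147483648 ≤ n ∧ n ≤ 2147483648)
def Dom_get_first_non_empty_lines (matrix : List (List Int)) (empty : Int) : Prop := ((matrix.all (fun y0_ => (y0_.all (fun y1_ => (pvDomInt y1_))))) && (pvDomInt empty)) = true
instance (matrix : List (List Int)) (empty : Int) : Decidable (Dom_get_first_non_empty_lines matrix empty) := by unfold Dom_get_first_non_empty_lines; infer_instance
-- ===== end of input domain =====

-- B walks the matrix row-major once with a remaining-unresolved-columns counter and early break,
-- instead of A's independent top-down scan per column (objective: alternative, same asymptotic cost).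


-- ===== PORT A =====
-- inner 'for line in range(len(matrix))' with break: first line index whose entry in column c ≠ empty, else -1.
-- Out-of-range matrix[line][column] raises in Python (excluded by Pre_); here it is read as 'empty' via getD.
def pvFindA (matrix : List (List Int)) (empty : Int) (c : Nat) (idx : Int) : Int :=
  match matrix with
  | [] => -1
  | row :: rest =>
    if (PySem.List.pyGet? row (c : Int)).getD empty ≠ empty then idx
    else pvFindA rest empty c (idx + 1)

def get_first_non_empty_lines (matrix : List (List Int)) (empty : Int) : List Int :=
  (List.range (matrix.headD []).length).map (fun c => pvFindA matrix empty c 0)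

-- ===== PORT B =====
-- inner 'for col in range(ncols)': update result entries still -1 from the current row, decrementing remaining.
def pvColsB (row : List Int) (empty ridx : Int) : List Int → Nat → Nat → (List Int × Nat)
  | [], _, rem => ([], rem)
  | r :: rs, col, rem =>
    if r = -1 ∧ (PySem.List.pyGet? row (col : Int)).getD empty ≠ empty then
      let p := pvColsB row empty ridx rs (col + 1) (rem - 1)
      (ridx :: p.1, p.2)
    else
      let p := pvColsB row empty ridx rs (col + 1) rem
      (r :: p.1, p.2)

-- outer 'for row_idx, row in enumerate(matrix)' with 'if remaining == 0: break'.
def pvRowsB (matrix : List (List Int)) (empty : Int) (ridx : Int) (res : List Int) (rem : Nat) : List Int :=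
  match matrix with
  | [] => res
  | row :: rest =>
    if rem = 0 then res
    else
      let p := pvColsB row empty ridx res 0 rem
      pvRowsB rest empty (ridx + 1) p.1 p.2

def get_first_non_empty_lines_alt (matrix : List (List Int)) (empty : Int) : List Int :=
  let ncols := (matrix.headD []).length
  pvRowsB matrix empty 0 (List.replicate ncols (-1)) ncols

-- ===== PRECONDITION & SPEC =====
-- Pre_ is exactly A's return domain: it excludes the empty matrix (matrix[0] raises IndexError) and the
-- ragged inputs where some column scan reaches a row shorter than the column index before a non-empty
-- entry, so matrix[line][column] raises IndexError (B raises on exactly the same inputs).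
def Pre_get_first_non_empty_lines (matrix : List (List Int)) (empty : Int) : Prop :=
  matrix ≠ [] ∧ ∀ c < (matrix.headD []).length, ∀ i < matrix.length,
    (matrix.getD i []).length ≤ c →
      ∃ j < i, c < (matrix.getD j []).length ∧ (matrix.getD j []).getD c empty ≠ empty
instance (matrix : List (List Int)) (empty : Int) : Decidable (Pre_get_first_non_empty_lines matrix empty) := by unfold Pre_get_first_non_empty_lines; infer_instance

def pvWitness_get_first_non_empty_lines : List (List Int) × Int := ([[0, 1], [2, 3]], 0)

def Spec_get_first_non_empty_lines (matrix : List (List Int)) (empty : Int) (out : List Int) : Prop := out = get_first_non_empty_lines_alt matrix empty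
instance (matrix : List (List Int)) (empty : Int) (out : List Int) : Decidable (Spec_get_first_non_empty_lines matrix empty out) := by unfold Spec_get_first_non_empty_lines; infer_instance

-- ===== CLAIM (what is proved, stated in full; the proofs are below) =====
def Claim_equal_get_first_non_empty_lines : Prop := ∀ (matrix : List (List Int)) (empty : Int), Dom_get_first_non_empty_lines matrix empty → Pre_get_first_non_empty_lines matrix empty → Spec_get_first_non_empty_lines matrix empty (get_first_non_empty_lines matrix empty)

-- ===== LEMMAS AND PROOFS =====

-- pointwise description of one pvColsB pass over the result list
def pvUpdOne (row : List Int) (empty ridx : Int) : List Int → Nat → List Int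
  | [], _ => []
  | r :: rs, col =>
    (if r = -1 ∧ (PySem.List.pyGet? row (col : Int)).getD empty ≠ empty then ridx else r)
      :: pvUpdOne row empty ridx rs (col + 1)

-- pointwise description of the whole remaining computation
def pvSpecRows (matrix : List (List Int)) (empty ridx : Int) : List Int → Nat → List Int
  | [], _ => []
  | r :: rs, col =>
    (if r = -1 then pvFindA matrix empty col ridx else r) :: pvSpecRows matrix empty ridx rs (col + 1)

lemma count_updOne_le (row : List Int) (empty ridx : Int) (hr : 0 ≤ ridx) :
    ∀ (res : List Int) (col : Nat),
      (pvUpdOne row empty ridx res col).count (-1) ≤ res.count (-1) := by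
  intro res
  induction res with
  | nil => intro col; simp [pvUpdOne]
  | cons r rs ih =>
    intro col
    have hi := ih (col + 1)
    have hne : (ridx == (-1 : Int)) = false := by
      simp only [beq_eq_false_iff_ne]; omega
    simp only [pvUpdOne, List.count_cons]
    split_ifs <;> first | omega | simp_all

lemma colsB_eq (row : List Int) (empty ridx : Int) (hr : 0 ≤ ridx) :
    ∀ (res : List Int) (col : Nat) (rem : Nat),
      pvColsB row empty ridx res col rem =
        (pvUpdOne row empty ridx res col,
         rem - (res.count (-1) - (pvUpdOne row empty ridx res col).count (-1))) := by
  intro res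
  induction res with
  | nil => intro col rem; simp [pvColsB, pvUpdOne]
  | cons r rs ih =>
    intro col rem
    simp only [pvColsB, pvUpdOne]
    have hle := count_updOne_le row empty ridx hr rs (col + 1)
    have hne : (ridx == (-1 : Int)) = false := by
      simp only [beq_eq_false_iff_ne]; omega
    split_ifs with h
    · rw [ih (col + 1) (rem - 1)]
      have hr1 : (r == (-1 : Int)) = true := by
        simp only [beq_iff_eq]; exact h.1
      simp only [List.count_cons, hne, hr1, Prod.mk.injEq, true_and, if_true]
      simp only [Bool.false_eq_true, if_false]
      omega
    · rw [ih (col + 1) rem]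
      simp only [List.count_cons, Prod.mk.injEq, true_and]
      rcases Bool.eq_false_or_eq_true (r == (-1 : Int)) with hb | hb <;> simp only [hb] <;>
        first | (simp; omega) | omega

lemma specRows_nil (empty ridx : Int) :
    ∀ (res : List Int) (col : Nat), pvSpecRows [] empty ridx res col = res := by
  intro res
  induction res with
  | nil => intro col; simp [pvSpecRows]
  | cons r rs ih =>
    intro col
    simp only [pvSpecRows, pvFindA]
    rw [ih (col + 1)]
    split_ifs with h
    · simp [h]
    · rfl

lemma specRows_of_count_zero (matrix : List (List Int)) (empty ridx : Int) :
    ∀ (res : List Int) (col : Nat), res.count (-1) = 0 →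
      pvSpecRows matrix empty ridx res col = res := by
  intro res
  induction res with
  | nil => intro col _; simp [pvSpecRows]
  | cons r rs ih =>
    intro col h
    simp only [List.count_cons] at h
    have hr : r ≠ -1 := by
      intro hr; subst hr; simp at h
    have hrs : rs.count (-1) = 0 := by
      by_cases hb : (r == (-1 : Int)) = true
      · simp [beq_iff_eq] at hb; exact absurd hb hr
      · simp only [Bool.not_eq_true] at hb; simp [hb] at h; exact h
    simp only [pvSpecRows]
    rw [ih (col + 1) hrs, if_neg hr]

lemma specRows_step (row : List Int) (rest : List (List Int)) (empty ridx : Int) (hr : 0 ≤ ridx) :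
    ∀ (res : List Int) (col : Nat),
      pvSpecRows rest empty (ridx + 1) (pvUpdOne row empty ridx res col) col =
        pvSpecRows (row :: rest) empty ridx res col := by
  intro res
  induction res with
  | nil => intro col; simp [pvUpdOne, pvSpecRows]
  | cons r rs ih =>
    intro col
    simp only [pvUpdOne, pvSpecRows, pvFindA]
    rw [ih (col + 1)]
    by_cases h2 : (PySem.List.pyGet? row (col : Int)).getD empty = empty
    · simp only [PySem.List.pyGet?_natCast] at h2
      by_cases h1 : r = -1 <;> simp [h1, h2]
    · simp only [PySem.List.pyGet?_natCast] at h2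
      by_cases h1 : r = -1
      · have hne : ridx ≠ -1 := by omega
        simp [h1, h2, hne]
      · simp [h1, h2]

lemma rowsB_eq (empty : Int) :
    ∀ (matrix : List (List Int)) (res : List Int) (rem : Nat) (ridx : Int),
      0 ≤ ridx → rem = res.count (-1) →
      pvRowsB matrix empty ridx res rem = pvSpecRows matrix empty ridx res 0 := by
  intro matrix
  induction matrix with
  | nil => intro res rem ridx _ _; rw [specRows_nil]; rfl
  | cons row rest ih =>
    intro res rem ridx hr hrem
    simp only [pvRowsB]
    split_ifs with h0
    · rw [specRows_of_count_zero]
      omega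
    · rw [colsB_eq row empty ridx hr res 0 rem]
      have hle := count_updOne_le row empty ridx hr res 0
      rw [ih (pvUpdOne row empty ridx res 0)
            (rem - (res.count (-1) - (pvUpdOne row empty ridx res 0).count (-1)))
            (ridx + 1) (by omega) (by omega)]
      exact specRows_step row rest empty ridx hr res 0

lemma specRows_replicate (matrix : List (List Int)) (empty : Int) :
    ∀ (n : Nat) (col : Nat),
      pvSpecRows matrix empty 0 (List.replicate n (-1)) col =
        (List.range' col n).map (fun c => pvFindA matrix empty c 0) := by
  intro n
  induction n with
  | zero => intro col; simp [pvSpecRows]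
  | succ k ih =>
    intro col
    simp only [List.replicate_succ, pvSpecRows, List.range'_succ, List.map_cons]
    rw [ih (col + 1)]
    simp

lemma count_replicate_neg_one (n : Nat) : (List.replicate n (-1 : Int)).count (-1) = n := by
  simp

-- ===== VERDICT (by name: the statement is the Claim_ definition above) =====
theorem get_first_non_empty_lines_spec : Claim_equal_get_first_non_empty_lines := by
  intro matrix empty _ _
  unfold Spec_get_first_non_empty_lines get_first_non_empty_lines get_first_non_empty_lines_alt
  rw [rowsB_eq empty matrix (List.replicate (matrix.headD []).length (-1))
        (matrix.headD []).length 0 (by omega) (count_replicate_neg_one _).symm,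
      specRows_replicate, List.range_eq_range']
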